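-- pv_equiv track=rewrite | github.com/bh3r1th/ExecLint | execlint/orchestrator.py | _report_breaker_severity
-- ===== SOURCE A (Python) =====
-- def _report_breaker_severity(what_breaks: str) -> int:
--     text = what_breaks.lower()
--     if any(token in text for token in ("no obvious runnable entrypoint", "no repository candidate")):
--         return 3
--     if any(
--         token in text
--         for token in (
--             "external checkpoints/weights not linked",
--             "no clear install path",
--             "dataset must be supplied manually",
--             "environment/cuda/version ambiguity",
--             "no clear runnable entrypoint",
--             "no clear inference/demo entrypoint",
--         )
--     ):
--         return 2
--     if any(token in text for token in ("stale or archived repo", "fix path unclear", "repository discovery unavailable")):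
--         return 1
--     return 0
-- ===== SOURCE B (Python) =====
-- _SEVERITY = {
--     "no obvious runnable entrypoint": 3,
--     "no repository candidate": 3,
--     "external checkpoints/weights not linked": 2,
--     "no clear install path": 2,
--     "dataset must be supplied manually": 2,
--     "environment/cuda/version ambiguity": 2,
--     "no clear runnable entrypoint": 2,
--     "no clear inference/demo entrypoint": 2,
--     "stale or archived repo": 1,
--     "fix path unclear": 1,
--     "repository discovery unavailable": 1,
-- }
--
--
-- def _report_breaker_severity(what_breaks: str) -> int:
--     text = what_breaks.lower()
--     return max((sev for tok, sev in _SEVERITY.items() if tok in text), default=0)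
-- ===== Notes on version B (the rewrite author's own statement) =====
-- stated objective: simpler
-- what changed: Replaced the three cascading any(...)/early-return branches with one flat token-to-severity table and a single max-over-matching-severities pass with default 0, exploiting that the priority cascade equals taking the maximum matching severity.
import Mathlib
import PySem

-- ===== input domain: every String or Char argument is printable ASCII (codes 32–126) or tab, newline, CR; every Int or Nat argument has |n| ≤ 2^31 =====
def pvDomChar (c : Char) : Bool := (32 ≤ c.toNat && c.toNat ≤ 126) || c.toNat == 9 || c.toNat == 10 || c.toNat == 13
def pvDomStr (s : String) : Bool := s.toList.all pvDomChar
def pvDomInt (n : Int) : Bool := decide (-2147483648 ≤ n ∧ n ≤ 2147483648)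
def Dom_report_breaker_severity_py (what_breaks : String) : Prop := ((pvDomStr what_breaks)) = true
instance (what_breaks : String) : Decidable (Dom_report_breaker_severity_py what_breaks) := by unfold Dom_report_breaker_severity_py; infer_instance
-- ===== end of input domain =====

-- B replaces A's three cascading any(...)/early-return branches with one flat
-- token→severity table folded with max (default 0); same result, simpler shape.

-- ===== PORT A =====
def report_breaker_severity_py (what_breaks : String) : Int :=
  let text := PySem.Str.lower what_breaks
  if ["no obvious runnable entrypoint", "no repository candidate"].any
      (fun tok => PySem.Str.isIn tok text) then 3
  else if ["external checkpoints/weights not linked",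
           "no clear install path",
           "dataset must be supplied manually",
           "environment/cuda/version ambiguity",
           "no clear runnable entrypoint",
           "no clear inference/demo entrypoint"].any
      (fun tok => PySem.Str.isIn tok text) then 2
  else if ["stale or archived repo", "fix path unclear", "repository discovery unavailable"].any
      (fun tok => PySem.Str.isIn tok text) then 1
  else 0

-- ===== PORT B =====
def pvSeverityTable : List (String × Int) :=
  [("no obvious runnable entrypoint", 3),
   ("no repository candidate", 3),
   ("external checkpoints/weights not linked", 2),
   ("no clear install path", 2),
   ("dataset must be supplied manually", 2),
   ("environment/cuda/version ambiguity", 2),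
   ("no clear runnable entrypoint", 2),
   ("no clear inference/demo entrypoint", 2),
   ("stale or archived repo", 1),
   ("fix path unclear", 1),
   ("repository discovery unavailable", 1)]

-- max((sev for tok, sev in table if tok in text), default=0) as a fold with max
def report_breaker_severity_py_alt (what_breaks : String) : Int :=
  let text := PySem.Str.lower what_breaks
  pvSeverityTable.foldl (fun acc p => if PySem.Str.isIn p.1 text then max acc p.2 else acc) 0

-- ===== PRECONDITION & SPEC =====
def Spec_report_breaker_severity_py (what_breaks : String) (out : Int) : Prop := out = report_breaker_severity_py_alt what_breaks
instance (what_breaks : String) (out : Int) : Decidable (Spec_report_breaker_severity_py what_breaks out) := by unfold Spec_report_breaker_severity_py; infer_instance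

-- ===== CLAIM (what is proved, stated in full; the proofs are below) =====
def Claim_equal_report_breaker_severity_py : Prop := ∀ (what_breaks : String), Dom_report_breaker_severity_py what_breaks → Spec_report_breaker_severity_py what_breaks (report_breaker_severity_py what_breaks)

-- ===== LEMMAS AND PROOFS =====

lemma pvKey (b1 b2 b3 b4 b5 b6 b7 b8 b9 b10 b11 : Bool) :
    (if [b1, b2].any (fun b => b) then (3 : Int)
     else if [b3, b4, b5, b6, b7, b8].any (fun b => b) then 2
     else if [b9, b10, b11].any (fun b => b) then 1 else 0)
    = [(b1, (3 : Int)), (b2, 3), (b3, 2), (b4, 2), (b5, 2), (b6, 2),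
       (b7, 2), (b8, 2), (b9, 1), (b10, 1), (b11, 1)].foldl
        (fun acc p => if p.1 then max acc p.2 else acc) 0 := by
  revert b1 b2 b3 b4 b5 b6 b7 b8 b9 b10 b11
  decide

-- ===== VERDICT (by name: the statement is the Claim_ definition above) =====
set_option maxHeartbeats 2000000 in
theorem report_breaker_severity_py_spec : Claim_equal_report_breaker_severity_py := by
  intro w _
  show report_breaker_severity_py w = report_breaker_severity_py_alt w
  exact pvKey
    (PySem.Str.isIn "no obvious runnable entrypoint" (PySem.Str.lower w))
    (PySem.Str.isIn "no repository candidate" (PySem.Str.lower w))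
    (PySem.Str.isIn "external checkpoints/weights not linked" (PySem.Str.lower w))
    (PySem.Str.isIn "no clear install path" (PySem.Str.lower w))
    (PySem.Str.isIn "dataset must be supplied manually" (PySem.Str.lower w))
    (PySem.Str.isIn "environment/cuda/version ambiguity" (PySem.Str.lower w))
    (PySem.Str.isIn "no clear runnable entrypoint" (PySem.Str.lower w))
    (PySem.Str.isIn "no clear inference/demo entrypoint" (PySem.Str.lower w))
    (PySem.Str.isIn "stale or archived repo" (PySem.Str.lower w))
    (PySem.Str.isIn "fix path unclear" (PySem.Str.lower w))
    (PySem.Str.isIn "repository discovery unavailable" (PySem.Str.lower w))
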